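-- pv_equiv track=rewrite | github.com/Hakir-Mubarmaj/ml-qem-boosting | src/splitting/split_methods.py | group_by_block
-- ===== SOURCE A (Python) =====
-- from typing import List, Dict
--
-- def group_by_block(feature_names: List[str], n_blocks: int) -> Dict[str, List[str]]:
--     groups = {}
--     n = len(feature_names)
--     block_size = max(1, n // n_blocks)
--     for i in range(n_blocks):
--         start = i * block_size
--         end = None if i == n_blocks - 1 else (i + 1) * block_size
--         sel = feature_names[start:end]
--         groups[f'block_{i}'] = sel
--     return groups
-- ===== SOURCE B (Python) =====
-- def group_by_block(feature_names, n_blocks):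
--     n = len(feature_names)
--     block_size = max(1, n // n_blocks)
--     groups = {f'block_{i}': [] for i in range(n_blocks)}
--     for j, name in enumerate(feature_names):
--         groups[f'block_{min(j // block_size, n_blocks - 1)}'].append(name)
--     return groups
-- ===== Notes on version B (the rewrite author's own statement) =====
-- stated objective: alternative
-- what changed: B pre-seeds every block key and scatters each feature into its block by index arithmetic (j // block_size, capped at the last block) in one pass over the features, instead of slicing the feature list block-by-block.
-- outside the precondition, e.g. on group_by_block(['a'], -1): A returns {}, B raises KeyError
import Mathlib
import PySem

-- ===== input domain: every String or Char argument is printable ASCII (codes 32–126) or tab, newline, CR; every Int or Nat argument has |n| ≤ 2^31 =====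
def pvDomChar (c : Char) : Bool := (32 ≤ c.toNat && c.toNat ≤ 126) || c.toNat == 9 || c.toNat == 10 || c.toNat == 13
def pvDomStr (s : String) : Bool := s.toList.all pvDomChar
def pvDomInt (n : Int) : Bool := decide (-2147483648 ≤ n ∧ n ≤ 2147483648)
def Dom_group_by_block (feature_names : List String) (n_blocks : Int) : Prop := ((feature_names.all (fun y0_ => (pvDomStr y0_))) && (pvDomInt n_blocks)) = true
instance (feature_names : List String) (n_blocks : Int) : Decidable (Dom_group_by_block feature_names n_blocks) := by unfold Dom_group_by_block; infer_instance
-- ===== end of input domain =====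

-- B scatters each feature into its pre-seeded block by index arithmetic instead of slicing block-by-block (alternative decomposition, same cost).

-- ===== PORT A =====
def group_by_block (feature_names : List String) (n_blocks : Int) : List (String × List String) :=
  let n : Int := feature_names.length
  let block_size : Int := max 1 (PySem.Int.floordiv n n_blocks)
  let groups : PySem.Dict String (List String) :=
    (PySem.List.pyRange 0 n_blocks 1).foldl (fun g i =>
      let start := i * block_size
      let sel := if i = n_blocks - 1
        then PySem.List.slice feature_names (some start) none
        else PySem.List.slice feature_names (some start) (some ((i + 1) * block_size))
      g.insert ("block_" ++ PySem.Int.toStr i) sel) PySem.Dict.empty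
  groups.items

-- ===== PORT B =====
def group_by_block_alt (feature_names : List String) (n_blocks : Int) : List (String × List String) :=
  let n : Int := feature_names.length
  let block_size : Int := max 1 (PySem.Int.floordiv n n_blocks)
  let groups0 : PySem.Dict String (List String) :=
    (PySem.List.pyRange 0 n_blocks 1).foldl (fun g i =>
      g.insert ("block_" ++ PySem.Int.toStr i) []) PySem.Dict.empty
  let groups : PySem.Dict String (List String) :=
    (PySem.List.enumerate feature_names).foldl (fun g p =>
      g.modify ("block_" ++ PySem.Int.toStr (min (PySem.Int.floordiv p.1 block_size) (n_blocks - 1))) []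
        (fun v => v ++ [p.2])) groups0
  groups.items

-- ===== PRECONDITION & SPEC =====
-- Pre_ excludes n_blocks = 0, where A (and B) raise ZeroDivisionError, and negative n_blocks with a
-- nonempty list, where A returns an empty dict silently dropping every feature (an artefact of the
-- empty range loop) while B raises KeyError.
def Pre_group_by_block (feature_names : List String) (n_blocks : Int) : Prop :=
  1 ≤ n_blocks ∨ (feature_names = [] ∧ n_blocks ≠ 0)
instance (feature_names : List String) (n_blocks : Int) : Decidable (Pre_group_by_block feature_names n_blocks) := by unfold Pre_group_by_block; infer_instance

def pvWitness_group_by_block : List String × Int := (["a", "b", "c"], 2)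

def Spec_group_by_block (feature_names : List String) (n_blocks : Int) (out : List (String × List String)) : Prop := out = group_by_block_alt feature_names n_blocks
instance (feature_names : List String) (n_blocks : Int) (out : List (String × List String)) : Decidable (Spec_group_by_block feature_names n_blocks out) := by unfold Spec_group_by_block; infer_instance

-- ===== CLAIM (what is proved, stated in full; the proofs are below) =====
def Claim_equal_group_by_block : Prop := ∀ (feature_names : List String) (n_blocks : Int), Dom_group_by_block feature_names n_blocks → Pre_group_by_block feature_names n_blocks → Spec_group_by_block feature_names n_blocks (group_by_block feature_names n_blocks)

-- ===== LEMMAS AND PROOFS =====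

lemma pv_digitChar_inj : ∀ a < 10, ∀ b < 10, Nat.digitChar a = Nat.digitChar b → a = b := by decide

lemma pv_toDigits_inj (a : Nat) : ∀ b, Nat.toDigits 10 a = Nat.toDigits 10 b → a = b := by
  induction a using Nat.strong_induction_on with
  | _ a ih =>
    intro b h
    by_cases ha : a < 10 <;> by_cases hb : b < 10
    · rw [Nat.toDigits_of_lt_base ha, Nat.toDigits_of_lt_base hb] at h
      exact pv_digitChar_inj a ha b hb (List.singleton_injective h)
    · rw [Nat.toDigits_of_lt_base ha, Nat.toDigits_of_base_le (by omega) (by omega)] at h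
      have hl := congrArg List.length h
      have hp : 0 < (Nat.toDigits 10 (b / 10)).length := Nat.length_toDigits_pos
      rw [List.length_append] at hl
      simp only [List.length_singleton] at hl; omega
    · rw [Nat.toDigits_of_lt_base hb, Nat.toDigits_of_base_le (by omega) (by omega)] at h
      have hl := congrArg List.length h
      have hp : 0 < (Nat.toDigits 10 (a / 10)).length := Nat.length_toDigits_pos
      rw [List.length_append] at hl
      simp only [List.length_singleton] at hl; omega
    · have e1 : Nat.toDigits 10 a = Nat.toDigits 10 (a / 10) ++ [(a % 10).digitChar] :=
        Nat.toDigits_of_base_le (by omega) (by omega)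
      have e2 : Nat.toDigits 10 b = Nat.toDigits 10 (b / 10) ++ [(b % 10).digitChar] :=
        Nat.toDigits_of_base_le (by omega) (by omega)
      rw [e1, e2] at h
      have hc := List.concat_inj.mp (by simpa [List.concat_eq_append] using h)
      have hd : a / 10 = b / 10 := ih (a / 10) (by omega) _ hc.1
      have hm : a % 10 = b % 10 := pv_digitChar_inj _ (by omega) _ (by omega) hc.2
      omega

lemma pv_key_inj (a b : Int) (ha : 0 ≤ a) (hb : 0 ≤ b)
    (h : ("block_" ++ PySem.Int.toStr a) = ("block_" ++ PySem.Int.toStr b)) : a = b := by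
  have h1 := congrArg String.toList h
  rw [String.toList_append, String.toList_append, PySem.Int.toList_toStr, PySem.Int.toList_toStr] at h1
  have h2 : PySem.Int.toChars a = PySem.Int.toChars b := List.append_cancel_left h1
  unfold PySem.Int.toChars at h2
  rw [if_neg (by omega), if_neg (by omega)] at h2
  have := pv_toDigits_inj a.toNat b.toNat h2
  omega

lemma pv_map_pyGetD_range (fs : List String) (d : String) (a b : Int) (h0 : 0 ≤ a)
    (hb : b ≤ (fs.length : Int)) :
    (PySem.List.pyRange a b 1).map (fun j => PySem.List.pyGetD fs j d)
      = (fs.drop a.toNat).take (b.toNat - a.toNat) := by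
  by_cases hba : b ≤ a
  · rw [PySem.List.pyRange_one_eq_nil hba]
    have : b.toNat - a.toNat = 0 := by omega
    rw [this]
    simp
  · have hab : a < b := by omega
    have hlen : (fs.take b.toNat).length = b.toNat := by
      rw [List.length_take]; omega
    have hrange : (PySem.List.len (fs.take b.toNat)) = b := by
      simp [PySem.List.len, hlen]; omega
    have key := PySem.List.map_pyGetD_pyRange (fs.take b.toNat) d (a := a) h0
    rw [hrange] at key
    have hcongr : (PySem.List.pyRange a b 1).map (fun j => PySem.List.pyGetD fs j d)
        = (PySem.List.pyRange a b 1).map (fun j => PySem.List.pyGetD (fs.take b.toNat) j d) := by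
      apply List.map_congr_left
      intro j hj
      rw [PySem.List.mem_pyRange_one] at hj
      rw [PySem.List.pyGetD_eq_getElem fs d (by omega) (by omega),
          PySem.List.pyGetD_eq_getElem (fs.take b.toNat) d (by omega) (by rw [hlen]; omega)]
      rw [List.getElem_take]
    rw [hcongr, key, List.drop_take]

lemma pv_seg (fs : List String) (d : String) (p : Int → Bool) (A B : Int) (h0 : 0 ≤ A) (hAB : A ≤ B)
    (hp : ∀ j : Int, 0 ≤ j → j < (fs.length : Int) → (p j = true ↔ A ≤ j ∧ j < B)) :
    ((PySem.List.pyRange 0 (fs.length : Int) 1).filter p).map (fun j => PySem.List.pyGetD fs j d)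
      = (fs.drop A.toNat).take (B.toNat - A.toNat) := by
  set n : Int := (fs.length : Int) with hn
  have hn0 : 0 ≤ n := by simp [hn]
  set A' : Int := min A n with hA'
  set B' : Int := min B n with hB'
  have hsplit : PySem.List.pyRange 0 n 1
      = PySem.List.pyRange 0 A' 1 ++ PySem.List.pyRange A' B' 1 ++ PySem.List.pyRange B' n 1 := by
    rw [List.append_assoc,
        ← PySem.List.pyRange_one_append A' B' n (by omega) (by omega),
        ← PySem.List.pyRange_one_append 0 A' n (by omega) (by omega)]
  rw [hsplit, List.filter_append, List.filter_append]
  have f1 : (PySem.List.pyRange 0 A' 1).filter p = [] := by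
    rw [List.filter_eq_nil_iff]
    intro j hj
    rw [PySem.List.mem_pyRange_one] at hj
    intro hpj
    have := (hp j (by omega) (by omega)).mp hpj
    omega
  have f2 : (PySem.List.pyRange A' B' 1).filter p = PySem.List.pyRange A' B' 1 := by
    rw [List.filter_eq_self]
    intro j hj
    rw [PySem.List.mem_pyRange_one] at hj
    exact (hp j (by omega) (by omega)).mpr (by omega)
  have f3 : (PySem.List.pyRange B' n 1).filter p = [] := by
    rw [List.filter_eq_nil_iff]
    intro j hj
    rw [PySem.List.mem_pyRange_one] at hj
    intro hpj
    have := (hp j (by omega) (by omega)).mp hpj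
    omega
  rw [f1, f2, f3, List.nil_append, List.append_nil]
  rw [pv_map_pyGetD_range fs d A' B' (by omega) (by omega)]
  -- now align the clamped drop-take with the unclamped one
  by_cases hAn : A ≤ n
  · have hA'A : A' = A := by omega
    rw [hA'A]
    by_cases hBn : B ≤ n
    · have : B' = B := by omega
      rw [this]
    · have hB'n : B' = n := by omega
      rw [hB'n]
      have hlen : (fs.drop A.toNat).length = n.toNat - A.toNat := by
        simp [hn]
      rw [List.take_of_length_le (by omega), List.take_of_length_le (by omega)]
  · have h1 : A' = n := by omega
    have h2 : B' = n := by omega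
    have hdropA : fs.drop A.toNat = [] := by
      apply List.drop_eq_nil_of_le; omega
    have hdropA' : fs.drop A'.toNat = [] := by
      apply List.drop_eq_nil_of_le; omega
    rw [hdropA, hdropA']
    simp

lemma pv_main (fs : List String) (k : Int) (hk : 1 ≤ k) :
    group_by_block fs k = group_by_block_alt fs k := by
  unfold group_by_block group_by_block_alt
  set n : Int := (fs.length : Int) with hn
  set bs : Int := max 1 (PySem.Int.floordiv n k) with hbs
  have hbs1 : 1 ≤ bs := le_max_left _ _
  set key : Int → String := fun i => "block_" ++ PySem.Int.toStr i with hkey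
  set tgt : Int → Int := fun j => min (PySem.Int.floordiv j bs) (k - 1) with htgt
  set sel : Int → List String := fun i =>
    if i = k - 1 then PySem.List.slice fs (some (i * bs)) none
    else PySem.List.slice fs (some (i * bs)) (some ((i + 1) * bs)) with hsel
  -- key is injective on the block range
  have hkinj : ∀ x ∈ PySem.List.pyRange 0 k 1, ∀ y ∈ PySem.List.pyRange 0 k 1, key x = key y → x = y := by
    intro x hx y hy hxy
    rw [PySem.List.mem_pyRange_one] at hx hy
    exact pv_key_inj x y hx.1 hy.1 hxy
  -- A's items
  have hA : (List.foldl (fun g i =>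
      let start := i * bs
      let sel := if i = k - 1
        then PySem.List.slice fs (some start) none
        else PySem.List.slice fs (some start) (some ((i + 1) * bs))
      g.insert ("block_" ++ PySem.Int.toStr i) sel) PySem.Dict.empty (PySem.List.pyRange 0 k 1)).items
      = (PySem.List.pyRange 0 k 1).map (fun i => (key i, sel i)) := by
    rw [PySem.Dict.items_foldl_insert_fresh (PySem.List.pyRange 0 k 1) key sel PySem.Dict.empty
        (fun a _ => PySem.Dict.contains_empty (key a))
        (List.Nodup.map_on hkinj (PySem.List.nodup_pyRange_one 0 k))]
    rfl
  -- B's seed dict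
  have hB0 : (List.foldl (fun g i =>
      g.insert ("block_" ++ PySem.Int.toStr i) []) PySem.Dict.empty (PySem.List.pyRange 0 k 1)).items
      = (PySem.List.pyRange 0 k 1).map (fun i => (key i, ([] : List String))) := by
    rw [PySem.Dict.items_foldl_insert_fresh (PySem.List.pyRange 0 k 1) key (fun _ => [])
        PySem.Dict.empty (fun a _ => PySem.Dict.contains_empty (key a))
        (List.Nodup.map_on hkinj (PySem.List.nodup_pyRange_one 0 k))]
    rfl
  set g0 : PySem.Dict String (List String) := (List.foldl (fun g i =>
      g.insert ("block_" ++ PySem.Int.toStr i) []) PySem.Dict.empty (PySem.List.pyRange 0 k 1)) with hg0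
  have hkeys0 : g0.keys = (PySem.List.pyRange 0 k 1).map key := by
    show g0.items.map (·.1) = _
    rw [hB0, List.map_map]; rfl
  have hnod0 : g0.keys.Nodup := by
    rw [hkeys0]; exact List.Nodup.map_on hkinj (PySem.List.nodup_pyRange_one 0 k)
  -- the target block index is always in range
  have htgt_range : ∀ j : Int, 0 ≤ j → 0 ≤ tgt j ∧ tgt j < k := by
    intro j hj
    have hd : 0 ≤ PySem.Int.floordiv j bs := by
      rw [PySem.Int.floordiv_eq_ediv_of_pos (by omega)]
      exact Int.ediv_nonneg hj (by omega)
    simp only [htgt]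
    omega
  -- keys are unchanged by the scatter loop
  set g1 : PySem.Dict String (List String) := (PySem.List.enumerate fs).foldl (fun g p =>
      g.modify ("block_" ++ PySem.Int.toStr (min (PySem.Int.floordiv p.1 bs) (k - 1))) []
        (fun v => v ++ [p.2])) g0 with hg1
  have henum_mem : ∀ p ∈ PySem.List.enumerate fs, 0 ≤ p.1 ∧ p.1 < n := by
    intro p hp
    rw [PySem.List.mem_enumerate_iff] at hp
    obtain ⟨m, hm, rfl⟩ := hp
    simp [hn]; omega
  have hkeys1 : g1.keys = g0.keys := by
    rw [hg1]
    rw [PySem.Dict.keys_foldl_modify_key (PySem.List.enumerate fs)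
      (fun p => key (tgt p.1)) [] (fun _ p => fun v => v ++ [p.2]) g0]
    rw [PySem.Set.update_eq_append_filter]
    have hfil : ((PySem.Set.ofList ((PySem.List.enumerate fs).map (fun p => key (tgt p.1)))).filter
        (fun y => !(PySem.Set.contains g0.keys y))) = [] := by
      rw [List.filter_eq_nil_iff]
      intro y hy
      rw [PySem.Set.mem_ofList] at hy
      obtain ⟨p, hp, rfl⟩ := List.mem_map.mp hy
      have h1 := henum_mem p hp
      have h2 := htgt_range p.1 h1.1
      have : key (tgt p.1) ∈ g0.keys := by
        rw [hkeys0]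
        exact List.mem_map.mpr ⟨tgt p.1, PySem.List.mem_pyRange_one.mpr ⟨h2.1, h2.2⟩, rfl⟩
      simp [this]
    rw [hfil, List.append_nil]
  have hnod1 : g1.keys.Nodup := by rw [hkeys1]; exact hnod0
  have hfold_map : g1 = ((PySem.List.enumerate fs).map (fun p => (key (tgt p.1), p.2))).foldl
      (fun d q => d.modify q.1 [] (fun v => v ++ [q.2])) g0 := by
    rw [hg1, List.foldl_map]
  have hgetD : ∀ i ∈ PySem.List.pyRange 0 k 1, g1.getD (key i) []
      = ((PySem.List.enumerate fs).filter (fun p => decide (tgt p.1 = i))).map (·.2) := by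
    intro i hi
    rw [PySem.List.mem_pyRange_one] at hi
    rw [hfold_map, PySem.Dict.getD_foldl_modify_append]
    have hg0getD : g0.getD (key i) [] = [] := by
      refine PySem.Dict.getD_of_mem_items g0 ?_ hnod0 []
      rw [hB0]
      exact List.mem_map.mpr ⟨i, PySem.List.mem_pyRange_one.mpr ⟨hi.1, hi.2⟩, rfl⟩
    rw [hg0getD, List.nil_append, List.filter_map, List.map_map]
    have hpred : ∀ p ∈ PySem.List.enumerate fs,
        ((fun q : String × String => q.1 == key i) ∘ fun p : Int × String => (key (tgt p.1), p.2)) p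
          = decide (tgt p.1 = i) := by
      intro p hp
      have h1 := henum_mem p hp
      have h2 := htgt_range p.1 h1.1
      simp only [Function.comp_def]
      by_cases h : tgt p.1 = i
      · simp [h]
      · simp [h]
        intro hcontra
        exact h (pv_key_inj _ _ h2.1 (by omega) hcontra)
    rw [List.filter_congr hpred]
    rfl
  have hMi : ∀ i ∈ PySem.List.pyRange 0 k 1,
      ((PySem.List.enumerate fs).filter (fun p => decide (tgt p.1 = i))).map (·.2) = sel i := by
    intro i hi
    rw [PySem.List.mem_pyRange_one] at hi
    rw [PySem.List.enumerate_eq_map_pyRange fs "", List.filter_map, List.map_map]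
    have hlen : PySem.List.len fs = n := by simp [PySem.List.len, hn]
    rw [hlen]
    by_cases hik : i = k - 1
    · subst hik
      set A : Int := (k - 1) * bs with hAdef
      set B : Int := max n A with hBdef
      have hA0 : 0 ≤ A := mul_nonneg (by omega) (by omega)
      have hseg := pv_seg fs "" (fun j => decide (tgt j = (k - 1))) A B hA0 (le_max_right _ _) ?_
      · have heq : ((fun p : Int × String => decide (tgt p.1 = (k - 1))) ∘
            fun j => (j, PySem.List.pyGetD fs j "")) = fun j => decide (tgt j = (k - 1)) := by
          funext j; rfl
        have heq2 : ((fun p : Int × String => p.2) ∘ fun j => (j, PySem.List.pyGetD fs j ""))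
            = fun j => PySem.List.pyGetD fs j "" := by funext j; rfl
        rw [show ((fs.length : Int)) = n from hn.symm] at hseg
        simp only [Function.comp_def] at hseg ⊢
        rw [hseg]
        simp only [hsel, if_pos rfl]
        rw [PySem.List.slice_from fs hA0]
        rw [List.take_of_length_le]
        simp only [List.length_drop]
        omega
      · intro j hj0 hjn
        rw [show ((fs.length : Int)) = n from hn.symm] at hjn
        simp only [decide_eq_true_eq]
        have hq := (PySem.Int.le_floordiv_iff_mul_le (a := j) (b := bs) (q := k - 1) (by omega))
        constructor
        · intro hmin
          have hq1 : k - 1 ≤ PySem.Int.floordiv j bs := by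
            simp only [htgt] at hmin; omega
          exact ⟨hq.mp hq1, by omega⟩
        · intro hAB'
          have hq1 : k - 1 ≤ PySem.Int.floordiv j bs := hq.mpr hAB'.1
          simp only [htgt]; omega
    · set A : Int := i * bs with hAdef
      set B : Int := (i + 1) * bs with hBdef
      have hABrel : B = A + bs := by rw [hAdef, hBdef]; ring
      have hA0 : 0 ≤ A := mul_nonneg (by omega) (by omega)
      have hseg := pv_seg fs "" (fun j => decide (tgt j = i)) A B hA0 (by omega) ?_
      · rw [show ((fs.length : Int)) = n from hn.symm] at hseg
        simp only [Function.comp_def] at hseg ⊢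
        rw [hseg]
        simp only [hsel, if_neg hik]
        rw [PySem.List.slice_toNat fs hA0 (by omega)]
      · intro j hj0 hjn
        simp only [decide_eq_true_eq]
        have hq := (PySem.Int.floordiv_eq_iff_of_pos (a := j) (b := bs) (q := i) (by omega))
        rw [← hAdef, ← hBdef] at hq
        constructor
        · intro hmin
          have hq1 : PySem.Int.floordiv j bs = i := by
            simp only [htgt] at hmin; omega
          exact hq.mp hq1
        · intro hAB'
          have hq1 : PySem.Int.floordiv j bs = i := hq.mpr hAB'
          simp only [htgt]; omega
  have hitems1 : g1.items = g1.keys.map (fun c => (c, g1.getD c [])) :=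
    PySem.Dict.items_eq_map_keys g1 hnod1 []
  rw [hA]
  show List.map (fun i => (key i, sel i)) (PySem.List.pyRange 0 k 1) = g1.items
  rw [hitems1, hkeys1, hkeys0, List.map_map]
  apply List.map_congr_left
  intro i hi
  simp only [Function.comp_def]
  exact Prod.ext rfl ((hgetD i hi).trans (hMi i hi)).symm

lemma pv_degenerate (fs : List String) (k : Int) (hfs : fs = []) (hk : k ≤ 0) :
    group_by_block fs k = group_by_block_alt fs k := by
  subst hfs
  simp [group_by_block, group_by_block_alt, PySem.List.pyRange_one_eq_nil hk]

-- ===== VERDICT (by name: the statement is the Claim_ definition above) =====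
theorem group_by_block_spec : Claim_equal_group_by_block := by
  intro fs k _ hpre
  unfold Spec_group_by_block
  by_cases hk : 1 ≤ k
  · exact pv_main fs k hk
  · rcases hpre with h | ⟨hfs, _⟩
    · omega
    · exact pv_degenerate fs k hfs (by omega)
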